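-- pv_equiv track=rewrite | github.com/eolandro/IA2025 | magenta/Unidad 3/Caballo Rotar/Caballo.py | rotar
-- ===== SOURCE A (Python) =====
-- def rotar(mat, r, resu):
--     resu.append([fila[:] for fila in mat])
--     if r == 0:
--         return resu
--
--     n = len(mat)
--
--     borde = mat[0][:] + [mat[i][n-1] for i in range(1, n-1)] + mat[n-1][::-1] + [mat[i][0] for i in range(n-2, 0, -1)]
--
--
--     borde = borde[-3:] + borde[:-3]
--
--     idx = 0
--     for j in range(n):  # fila superior
--         mat[0][j] = borde[idx]; idx += 1
--     for i in range(1, n-1):  # columna derecha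
--         mat[i][n-1] = borde[idx]; idx += 1
--     for j in range(n-1, -1, -1):  # fila inferior
--         mat[n-1][j] = borde[idx]; idx += 1
--     for i in range(n-2, 0, -1):  # columna izquierda
--         mat[i][0] = borde[idx]; idx += 1
--
--     return rotar(mat, r - 1, resu)
-- ===== SOURCE B (Python) =====
-- # Alternative implementation: iterative loop over range(r) instead of tail recursion,
-- # one coordinate table (hoisted out of the loop) instead of four index loops with a
-- # running counter, and the rotation expressed as modular indexing into the border
-- # instead of slicing.  Like A, it mutates mat in place and appends snapshots to resu.
-- def rotar(mat, r, resu):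
--     resu.append([fila[:] for fila in mat])
--     n = len(mat)
--     coords = ([(0, j) for j in range(n)]
--               + [(i, n - 1) for i in range(1, n - 1)]
--               + [(n - 1, j) for j in range(n - 1, -1, -1)]
--               + [(i, 0) for i in range(n - 2, 0, -1)])
--     for _ in range(r):
--         borde = (mat[0][:] + [mat[i][n - 1] for i in range(1, n - 1)]
--                  + mat[n - 1][::-1] + [mat[i][0] for i in range(n - 2, 0, -1)])
--         m = len(borde)
--         for k, (i, j) in enumerate(coords):
--             mat[i][j] = borde[(k - 3) % m]
--         resu.append([fila[:] for fila in mat])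
--     return resu
-- ===== Notes on version B (the rewrite author's own statement) =====
-- stated objective: alternative
-- what changed: Tail recursion on r becomes a for-loop over range(r); the four edge-writing index loops with a running counter become one pass over a coordinate table hoisted out of the loop; the rotate-by-3 slicing becomes modular indexing into the border.
import Mathlib
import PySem

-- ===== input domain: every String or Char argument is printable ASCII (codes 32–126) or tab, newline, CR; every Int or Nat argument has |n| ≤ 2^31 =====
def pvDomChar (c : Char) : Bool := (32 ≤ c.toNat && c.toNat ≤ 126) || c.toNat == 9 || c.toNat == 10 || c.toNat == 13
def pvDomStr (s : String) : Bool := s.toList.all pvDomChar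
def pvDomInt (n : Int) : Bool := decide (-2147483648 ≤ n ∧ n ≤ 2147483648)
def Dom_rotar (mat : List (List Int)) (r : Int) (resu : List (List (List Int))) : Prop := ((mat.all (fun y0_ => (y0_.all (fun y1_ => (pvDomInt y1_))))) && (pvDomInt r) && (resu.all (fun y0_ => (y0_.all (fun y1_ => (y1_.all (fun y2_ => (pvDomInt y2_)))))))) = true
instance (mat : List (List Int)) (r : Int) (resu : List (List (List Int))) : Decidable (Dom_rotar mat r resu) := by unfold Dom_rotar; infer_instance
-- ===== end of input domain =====

-- B changes the decomposition (loop + one coordinate table + modular rotation instead of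
-- tail recursion + four counter loops + slicing); equal return value on Pre_; like A, the
-- Python B mutates mat in place and appends to resu (equivalence proved for the RETURN value).

-- ===== PORT A =====
-- [fila[:] for fila in mat]
def pvCopy (mat : List (List Int)) : List (List Int) :=
  mat.map (fun fila => PySem.List.slice fila none none)

-- mat[i][j] = v  (total form; all indices are in range under Pre_rotar)
def setCell (mt : List (List Int)) (i j v : Int) : List (List Int) :=
  PySem.List.pySetD mt i (PySem.List.pySetD (PySem.List.pyGetD mt i []) j v)

-- mat[0][:] + [mat[i][n-1] for i in range(1,n-1)] + mat[n-1][::-1] + [mat[i][0] for i in range(n-2,0,-1)]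
-- (indexing in total pyGetD form; in range under Pre_rotar)
def bordeOf (mat : List (List Int)) (n : Int) : List Int :=
  PySem.List.slice (PySem.List.pyGetD mat 0 []) none none
  ++ (PySem.List.pyRange 1 (n - 1) 1).map
      (fun i => PySem.List.pyGetD (PySem.List.pyGetD mat i []) (n - 1) 0)
  ++ ((PySem.List.slice? (PySem.List.pyGetD mat (n - 1) []) none none (-1)).getD [])
  ++ (PySem.List.pyRange (n - 2) 0 (-1)).map
      (fun i => PySem.List.pyGetD (PySem.List.pyGetD mat i []) 0 0)

-- the body of A after the r == 0 test: rotate the border by 3 and write it back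
def rotarStepA (mat : List (List Int)) : List (List Int) :=
  let n : Int := PySem.List.len mat
  let borde := bordeOf mat n
  let borde2 := PySem.List.slice borde (some (-3)) none ++ PySem.List.slice borde none (some (-3))
  let st1 := (PySem.List.pyRange 0 n 1).foldl
    (fun (st : List (List Int) × Int) j => (setCell st.1 0 j (PySem.List.pyGetD borde2 st.2 0), st.2 + 1)) (mat, 0)
  let st2 := (PySem.List.pyRange 1 (n - 1) 1).foldl
    (fun (st : List (List Int) × Int) i => (setCell st.1 i (n - 1) (PySem.List.pyGetD borde2 st.2 0), st.2 + 1)) st1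
  let st3 := (PySem.List.pyRange (n - 1) (-1) (-1)).foldl
    (fun (st : List (List Int) × Int) j => (setCell st.1 (n - 1) j (PySem.List.pyGetD borde2 st.2 0), st.2 + 1)) st2
  let st4 := (PySem.List.pyRange (n - 2) 0 (-1)).foldl
    (fun (st : List (List Int) × Int) i => (setCell st.1 i 0 (PySem.List.pyGetD borde2 st.2 0), st.2 + 1)) st3
  st4.1

-- A's recursion, fuel = r.toNat: exact for r ≥ 0 (Pre_rotar); for r < 0 the Python
-- recurses with r-1 forever and never returns (excluded by Pre_rotar).
def rotarFuel : Nat → List (List Int) → List (List (List Int)) → List (List (List Int))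
  | 0, mat, resu => resu ++ [pvCopy mat]
  | f + 1, mat, resu => rotarFuel f (rotarStepA mat) (resu ++ [pvCopy mat])

def rotar (mat : List (List Int)) (r : Int) (resu : List (List (List Int))) : List (List (List Int)) :=
  rotarFuel r.toNat mat resu

-- ===== PORT B =====
-- the coordinate table, built once (B hoists it out of the loop)
def coordsOf (n : Int) : List (Int × Int) :=
  (PySem.List.pyRange 0 n 1).map (fun j => ((0 : Int), j))
  ++ (PySem.List.pyRange 1 (n - 1) 1).map (fun i => (i, n - 1))
  ++ (PySem.List.pyRange (n - 1) (-1) (-1)).map (fun j => (n - 1, j))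
  ++ (PySem.List.pyRange (n - 2) 0 (-1)).map (fun i => (i, (0 : Int)))

-- one loop body: for k, (i, j) in enumerate(coords): mat[i][j] = borde[(k - 3) % m]
def rotarStepB (n : Int) (coords : List (Int × Int)) (mat : List (List Int)) : List (List Int) :=
  let borde := bordeOf mat n
  let m : Int := PySem.List.len borde
  (PySem.List.enumerate coords 0).foldl
    (fun mt p => setCell mt p.2.1 p.2.2 (PySem.List.pyGetD borde (PySem.Int.mod (p.1 - 3) m) 0)) mat

def rotar_alt (mat : List (List Int)) (r : Int) (resu : List (List (List Int))) : List (List (List Int)) :=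
  let n : Int := PySem.List.len mat
  let coords := coordsOf n
  ((PySem.List.pyRange 0 r 1).foldl
     (fun (st : List (List Int) × List (List (List Int))) _ =>
        let mat2 := rotarStepB n coords st.1
        (mat2, st.2 ++ [pvCopy mat2]))
     (mat, resu ++ [pvCopy mat])).2

-- ===== PRECONDITION & SPEC =====
-- Pre_rotar = exactly the inputs where the Python A returns: r ≥ 0 (for r < 0 the recursion
-- never terminates: RecursionError), and for r > 0 a nonempty matrix whose rows all have at
-- least len(mat) entries (otherwise some mat[i][j] access raises IndexError).
def Pre_rotar (mat : List (List Int)) (r : Int) (resu : List (List (List Int))) : Prop :=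
  0 ≤ r ∧ (r = 0 ∨ (mat ≠ [] ∧ ∀ row ∈ mat, mat.length ≤ row.length))
instance (mat : List (List Int)) (r : Int) (resu : List (List (List Int))) : Decidable (Pre_rotar mat r resu) := by
  unfold Pre_rotar; infer_instance

def pvWitness_rotar : List (List Int) × Int × List (List (List Int)) := ([[1, 2], [3, 4]], 1, [])

def Spec_rotar (mat : List (List Int)) (r : Int) (resu : List (List (List Int))) (out : List (List (List Int))) : Prop := out = rotar_alt mat r resu
instance (mat : List (List Int)) (r : Int) (resu : List (List (List Int))) (out : List (List (List Int))) : Decidable (Spec_rotar mat r resu out) := by unfold Spec_rotar; infer_instance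

-- ===== CLAIM (what is proved, stated in full; the proofs are below) =====
def Claim_equal_rotar : Prop := ∀ (mat : List (List Int)) (r : Int) (resu : List (List (List Int))), Dom_rotar mat r resu → Pre_rotar mat r resu → Spec_rotar mat r resu (rotar mat r resu)


-- ===== LEMMAS AND PROOFS =====

-- threading the idx counter: a counter loop is a fold over enumerate
theorem pv_foldl_counter (l : List Int) (I J V : Int → Int)
    (mt : List (List Int)) (s : Int) :
    l.foldl (fun (st : List (List Int) × Int) j =>
        (setCell st.1 (I j) (J j) (V st.2), st.2 + 1)) (mt, s)
    = ((PySem.List.enumerate l s).foldl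
        (fun mt p => setCell mt (I p.2) (J p.2) (V p.1)) mt, s + l.length) := by
  induction l generalizing mt s with
  | nil => simp [PySem.List.enumerate_nil]
  | cons a t ih =>
    simp only [List.foldl_cons, PySem.List.enumerate_cons, ih]
    simp only [Prod.mk.injEq]
    exact ⟨trivial, by simp [List.length_cons]; omega⟩

theorem pv_enumerate_map (f : Int → Int × Int) (l : List Int) (s : Int) :
    PySem.List.enumerate (l.map f) s
      = (PySem.List.enumerate l s).map (fun p => (p.1, f p.2)) := by
  induction l generalizing s with
  | nil => simp [PySem.List.enumerate_nil]
  | cons a t ih => simp [PySem.List.enumerate_cons, ih]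
-- borde[-3:] + borde[:-3] indexed at k equals borde[(k-3) % len(borde)]
theorem pv_rot3_idx (L : List Int) (k : Int) (h3 : 3 ≤ L.length)
    (hk0 : 0 ≤ k) (hk : k < (L.length : Int)) :
    PySem.List.pyGetD
      (PySem.List.slice L (some (-3)) none ++ PySem.List.slice L none (some (-3))) k 0
    = PySem.List.pyGetD L (PySem.Int.mod (k - 3) (L.length : Int)) 0 := by
  rw [PySem.List.slice_from_neg_ofNat L 3 (by omega),
      PySem.List.slice_to_neg_ofNat L 3 (by omega)]
  have hlen : (L.drop (L.length - 3) ++ L.take (L.length - 3)).length = L.length := by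
    simp
  have hmod : PySem.Int.mod (k - 3) (L.length : Int)
      = if k < 3 then k + (L.length : Int) - 3 else k - 3 := by
    rw [PySem.Int.mod_eq_emod_of_pos (a := k - 3) (b := (L.length : Int)) (by omega)]
    split_ifs with h
    · rw [← Int.add_mul_emod_self_left (a := k - 3) (b := (L.length : Int)) (c := 1)]
      rw [show k - 3 + (L.length : Int) * 1 = k + (L.length : Int) - 3 by ring]
      exact Int.emod_eq_of_lt (by omega) (by omega)
    · exact Int.emod_eq_of_lt (by omega) (by omega)
  have hm0 : 0 ≤ PySem.Int.mod (k - 3) (L.length : Int) := by rw [hmod]; split_ifs <;> omega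
  have hm1 : PySem.Int.mod (k - 3) (L.length : Int) < (L.length : Int) := by
    rw [hmod]; split_ifs <;> omega
  rw [PySem.List.pyGetD_eq_getElem _ 0 hk0 (by simp only [hlen]; exact hk),
      PySem.List.pyGetD_eq_getElem _ 0 hm0 hm1]
  rcases lt_or_ge k 3 with hlt | hge
  · rw [List.getElem_append_left (by simp; omega)]
    rw [List.getElem_drop]
    congr 1
    rw [hmod, if_pos hlt]; omega
  · rw [List.getElem_append_right (by simp; omega)]
    rw [List.getElem_take]
    congr 1
    rw [hmod, if_neg (not_lt.mpr hge)]; simp; omega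
theorem pv_setCell_mapLength (mt : List (List Int)) (i j v : Int) (hi : 0 ≤ i) :
    (setCell mt i j v).map List.length = mt.map List.length := by
  unfold setCell
  rw [PySem.List.pySetD_of_nonneg _ _ hi, List.map_set]
  rcases lt_or_ge i.toNat mt.length with h | h
  · rw [PySem.List.length_pySetD,
        PySem.List.pyGetD_eq_getElem _ [] hi (by omega)]
    rw [show (mt.map List.length).set i.toNat mt[i.toNat].length
          = (mt.map List.length).set i.toNat ((mt.map List.length)[i.toNat]'(by simpa using h)) by
        simp]
    exact List.set_getElem_self (by simpa using h)
  · exact List.set_eq_of_length_le (by simpa using h)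

theorem pv_foldl_setCell_mapLength {γ : Type} (l : List γ) (I J W : γ → Int) :
    ∀ (mt : List (List Int)), (∀ x ∈ l, 0 ≤ I x) →
    (l.foldl (fun mt x => setCell mt (I x) (J x) (W x)) mt).map List.length
      = mt.map List.length := by
  induction l with
  | nil => intro mt _; simp
  | cons a t ih =>
    intro mt h
    simp only [List.foldl_cons]
    rw [ih _ (fun x hx => h x (List.mem_cons_of_mem a hx)),
        pv_setCell_mapLength _ _ _ _ (h a (List.mem_cons_self))]
theorem pv_coordsOf_fst_nonneg (n : Int) (hn : 1 ≤ n) :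
    ∀ p ∈ coordsOf n, 0 ≤ p.1 := by
  intro p hp
  simp only [coordsOf, List.mem_append, List.mem_map] at hp
  rcases hp with ((⟨j, hj, rfl⟩ | ⟨i, hi, rfl⟩) | ⟨j, hj, rfl⟩) | ⟨i, hi, rfl⟩ <;>
    first
    | (rw [PySem.List.mem_pyRange_one] at * ; omega)
    | (rw [PySem.List.mem_pyRange_neg_one] at * ; omega)
    | omega

theorem pv_stepB_mapLength (n : Int) (hn : 1 ≤ n) (mat : List (List Int)) :
    (rotarStepB n (coordsOf n) mat).map List.length = mat.map List.length := by
  have h := pv_foldl_setCell_mapLength (PySem.List.enumerate (coordsOf n) 0)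
      (fun p => p.2.1) (fun p => p.2.2)
      (fun p => PySem.List.pyGetD (bordeOf mat n)
        (PySem.Int.mod (p.1 - 3) (PySem.List.len (bordeOf mat n))) 0)
      mat
      (by
        intro x hx
        rw [PySem.List.mem_enumerate_iff] at hx
        obtain ⟨k, hk, rfl⟩ := hx
        exact pv_coordsOf_fst_nonneg n hn _ (List.getElem_mem hk))
  simpa [rotarStepB] using h

theorem pv_bordeOf_length (mat : List (List Int)) (n : Int) :
    (bordeOf mat n).length
      = (PySem.List.pyGetD mat 0 []).length + (n - 1 - 1).toNat
        + (PySem.List.pyGetD mat (n - 1) []).length + (n - 2).toNat := by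
  simp [bordeOf, PySem.List.slice_none_none, PySem.List.slice?_none_none_neg_one,
    PySem.List.length_pyRange_one, PySem.List.length_pyRange_neg_one]
  omega
theorem pv_counter_row (l : List Int) (L : List Int) (a : Int)
    (mt : List (List Int)) (s : Int) :
    l.foldl (fun (st : List (List Int) × Int) j =>
        (setCell st.1 a j (PySem.List.pyGetD L st.2 0), st.2 + 1)) (mt, s)
    = ((PySem.List.enumerate l s).foldl
        (fun mt p => setCell mt a p.2 (PySem.List.pyGetD L p.1 0)) mt, s + l.length) := by
  simpa using pv_foldl_counter l (fun _ => a) (fun j => j) (fun k => PySem.List.pyGetD L k 0) mt s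

theorem pv_counter_col (l : List Int) (L : List Int) (a : Int)
    (mt : List (List Int)) (s : Int) :
    l.foldl (fun (st : List (List Int) × Int) i =>
        (setCell st.1 i a (PySem.List.pyGetD L st.2 0), st.2 + 1)) (mt, s)
    = ((PySem.List.enumerate l s).foldl
        (fun mt p => setCell mt p.2 a (PySem.List.pyGetD L p.1 0)) mt, s + l.length) := by
  simpa using pv_foldl_counter l (fun i => i) (fun _ => a) (fun k => PySem.List.pyGetD L k 0) mt s

theorem rotar_step_eq (mat : List (List Int)) (hne : mat ≠ [])
    (hrow : ∀ row ∈ mat, mat.length ≤ row.length) :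
    rotarStepA mat = rotarStepB ((mat.length : Int)) (coordsOf ((mat.length : Int))) mat := by
  have hn : 1 ≤ mat.length := List.length_pos_of_ne_nil hne
  have hlen0 : mat.length ≤ (PySem.List.pyGetD mat 0 []).length :=
    hrow _ (PySem.List.pyGetD_mem mat [] (by constructor <;> omega))
  have hlenN : mat.length ≤ (PySem.List.pyGetD mat ((mat.length : Int) - 1) []).length :=
    hrow _ (PySem.List.pyGetD_mem mat [] (by constructor <;> omega))
  have hm := pv_bordeOf_length mat ((mat.length : Int))
  by_cases h3 : 3 ≤ (bordeOf mat ((mat.length : Int))).length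
  · -- general case
    simp only [rotarStepA, rotarStepB, coordsOf, PySem.List.len_eq]
    rw [pv_counter_row, pv_counter_col, pv_counter_row, pv_counter_col]
    simp only [PySem.List.enumerate_append, pv_enumerate_map, List.foldl_map,
      List.foldl_append, List.length_map, List.length_append, Nat.cast_add, zero_add]
    set N : Int := (mat.length : Int) with hN
    set b := bordeOf mat N with hb
    have hbound : ∀ (s : Int) (l : List Int) (x : Int × Int),
        x ∈ PySem.List.enumerate l s → 0 ≤ s → s + (l.length : Int) ≤ (b.length : Int) →
        0 ≤ x.1 ∧ x.1 < (b.length : Int) := by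
      intro s l x hx hs hsl
      rw [PySem.List.mem_enumerate_iff] at hx
      obtain ⟨k, hk, rfl⟩ := hx
      constructor <;> simp <;> omega
    have g1 : ∀ init, List.foldl
        (fun mt p => setCell mt 0 p.2
          (PySem.List.pyGetD (PySem.List.slice b (some (-3)) none ++ PySem.List.slice b none (some (-3))) p.1 0))
        init (PySem.List.enumerate (PySem.List.pyRange 0 N) 0)
      = List.foldl
        (fun x y => setCell x 0 y.2
          (PySem.List.pyGetD b (PySem.Int.mod (y.1 - 3) (b.length : Int)) 0))
        init (PySem.List.enumerate (PySem.List.pyRange 0 N) 0) := by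
      intro init
      refine PySem.List.foldl_congr_mem _ _ _ init ?_
      intro acc x hx
      obtain ⟨hx0, hx1⟩ := hbound _ _ _ hx (by omega)
        (by rw [PySem.List.length_pyRange_one]; omega)
      exact congrArg (fun v => setCell acc 0 x.2 v) (pv_rot3_idx b x.1 h3 hx0 hx1)
    have g2 : ∀ init, List.foldl
        (fun mt p => setCell mt p.2 (N - 1)
          (PySem.List.pyGetD (PySem.List.slice b (some (-3)) none ++ PySem.List.slice b none (some (-3))) p.1 0))
        init (PySem.List.enumerate (PySem.List.pyRange 1 (N - 1)) ((PySem.List.pyRange 0 N).length : Int))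
      = List.foldl
        (fun x y => setCell x y.2 (N - 1)
          (PySem.List.pyGetD b (PySem.Int.mod (y.1 - 3) (b.length : Int)) 0))
        init (PySem.List.enumerate (PySem.List.pyRange 1 (N - 1)) ((PySem.List.pyRange 0 N).length : Int)) := by
      intro init
      refine PySem.List.foldl_congr_mem _ _ _ init ?_
      intro acc x hx
      obtain ⟨hx0, hx1⟩ := hbound _ _ _ hx (by positivity)
        (by rw [PySem.List.length_pyRange_one, PySem.List.length_pyRange_one]; omega)
      exact congrArg (fun v => setCell acc x.2 (N - 1) v) (pv_rot3_idx b x.1 h3 hx0 hx1)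
    have g3 : ∀ init, List.foldl
        (fun mt p => setCell mt (N - 1) p.2
          (PySem.List.pyGetD (PySem.List.slice b (some (-3)) none ++ PySem.List.slice b none (some (-3))) p.1 0))
        init (PySem.List.enumerate (PySem.List.pyRange (N - 1) (-1) (-1))
          (((PySem.List.pyRange 0 N).length : Int) + ((PySem.List.pyRange 1 (N - 1)).length : Int)))
      = List.foldl
        (fun x y => setCell x (N - 1) y.2
          (PySem.List.pyGetD b (PySem.Int.mod (y.1 - 3) (b.length : Int)) 0))
        init (PySem.List.enumerate (PySem.List.pyRange (N - 1) (-1) (-1))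
          (((PySem.List.pyRange 0 N).length : Int) + ((PySem.List.pyRange 1 (N - 1)).length : Int))) := by
      intro init
      refine PySem.List.foldl_congr_mem _ _ _ init ?_
      intro acc x hx
      obtain ⟨hx0, hx1⟩ := hbound _ _ _ hx (by positivity)
        (by rw [PySem.List.length_pyRange_one, PySem.List.length_pyRange_one,
                PySem.List.length_pyRange_neg_one]; omega)
      exact congrArg (fun v => setCell acc (N - 1) x.2 v) (pv_rot3_idx b x.1 h3 hx0 hx1)
    have g4 : ∀ init, List.foldl
        (fun mt p => setCell mt p.2 0
          (PySem.List.pyGetD (PySem.List.slice b (some (-3)) none ++ PySem.List.slice b none (some (-3))) p.1 0))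
        init (PySem.List.enumerate (PySem.List.pyRange (N - 2) 0 (-1))
          (((PySem.List.pyRange 0 N).length : Int) + ((PySem.List.pyRange 1 (N - 1)).length : Int)
            + ((PySem.List.pyRange (N - 1) (-1) (-1)).length : Int)))
      = List.foldl
        (fun x y => setCell x y.2 0
          (PySem.List.pyGetD b (PySem.Int.mod (y.1 - 3) (b.length : Int)) 0))
        init (PySem.List.enumerate (PySem.List.pyRange (N - 2) 0 (-1))
          (((PySem.List.pyRange 0 N).length : Int) + ((PySem.List.pyRange 1 (N - 1)).length : Int)
            + ((PySem.List.pyRange (N - 1) (-1) (-1)).length : Int))) := by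
      intro init
      refine PySem.List.foldl_congr_mem _ _ _ init ?_
      intro acc x hx
      obtain ⟨hx0, hx1⟩ := hbound _ _ _ hx (by positivity)
        (by rw [PySem.List.length_pyRange_one, PySem.List.length_pyRange_one,
                PySem.List.length_pyRange_neg_one, PySem.List.length_pyRange_neg_one]; omega)
      exact congrArg (fun v => setCell acc x.2 0 v) (pv_rot3_idx b x.1 h3 hx0 hx1)
    rw [g1, g2, g3, g4]
  · -- fewer than 3 border entries: mat must be [[x]]
    have h2 : (bordeOf mat ((mat.length : Int))).length = 2 := by omega
    have hn1 : mat.length = 1 := by omega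
    obtain ⟨row, hrow1⟩ := List.length_eq_one_iff.mp hn1
    subst hrow1
    have hr0 : PySem.List.pyGetD [row] (0 : Int) [] = row := PySem.List.pyGetD_zero_cons row [] []
    have hrlen : row.length = 1 := by
      rw [hr0] at hlen0 hm
      omega
    obtain ⟨x, hx1⟩ := List.length_eq_one_iff.mp hrlen
    subst hx1
    have e1 : ((([[x]] : List (List Int)).length : Int)) = 1 := by simp
    rw [e1]
    have hr1 : PySem.List.pyRange 0 (1:Int) 1 = [0] := by decide
    have hr2 : PySem.List.pyRange 1 (1-1 : Int) 1 = [] := by decide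
    have hr3 : PySem.List.pyRange (1-1 : Int) (-1) (-1) = [0] := by decide
    have hr4 : PySem.List.pyRange (1-2 : Int) 0 (-1) = [] := by decide
    have hbx : bordeOf [[x]] 1 = [x, x] := by
      simp only [bordeOf, hr2, hr4, PySem.List.slice_none_none, PySem.List.slice?_none_none_neg_one]
      rfl
    have hstepA : rotarStepA [[x]] = [[x]] := by
      have e2 : ((([[x]] : List (List Int)).length : Int)) = 1 := by simp
      simp only [rotarStepA, PySem.List.len_eq, e2]
      rw [hbx, hr1, hr3]
      rfl
    have hstepB : rotarStepB 1 (coordsOf 1) [[x]] = [[x]] := by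
      have hc : coordsOf 1 = [((0:Int),(0:Int)), (0, 0)] := by
        simp only [coordsOf, hr1, hr2, hr3, hr4]
        rfl
      have hm1 : PySem.Int.mod (0 - 3) 2 = 1 := by decide
      have hm2 : PySem.Int.mod (1 - 3) 2 = 0 := by decide
      simp only [rotarStepB, PySem.List.len_eq, hbx, hc, List.length_cons, List.length_nil,
        PySem.List.enumerate_cons, PySem.List.enumerate_nil, List.foldl_cons, List.foldl_nil]
      norm_num [hm1, hm2]
      rfl
    rw [hstepA, hstepB]
theorem pv_loop_eq (n : Int) : ∀ (l : List Int) (mat : List (List Int)) (resu : List (List (List Int))),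
    mat ≠ [] → (∀ row ∈ mat, mat.length ≤ row.length) → ((mat.length : Int) = n) →
    rotarFuel l.length mat resu
    = (l.foldl (fun (st : List (List Int) × List (List (List Int))) _ =>
        let mat2 := rotarStepB n (coordsOf n) st.1
        (mat2, st.2 ++ [pvCopy mat2])) (mat, resu ++ [pvCopy mat])).2 := by
  intro l
  induction l with
  | nil => intro mat resu _ _ _; simp [rotarFuel]
  | cons a t ih =>
    intro mat resu h1 h2 h3
    simp only [List.length_cons, List.foldl_cons]
    rw [show rotarFuel (t.length + 1) mat resu
          = rotarFuel t.length (rotarStepA mat) (resu ++ [pvCopy mat]) from rfl]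
    rw [rotar_step_eq mat h1 h2, h3]
    have hn1 : 1 ≤ mat.length := List.length_pos_of_ne_nil h1
    have hsh := pv_stepB_mapLength n (by omega) mat
    have hlen' : (rotarStepB n (coordsOf n) mat).length = mat.length := by
      have := congrArg List.length hsh; simpa using this
    exact ih (rotarStepB n (coordsOf n) mat) (resu ++ [pvCopy mat])
      (by rw [← List.length_pos_iff]; omega)
      (by
        intro row hrowmem
        have : row.length ∈ (rotarStepB n (coordsOf n) mat).map List.length :=
          List.mem_map_of_mem hrowmem
        rw [hsh] at this
        obtain ⟨r0, hr0, hr0e⟩ := List.mem_map.mp this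
        have := h2 r0 hr0
        omega)
      (by rw [hlen', h3])
theorem pv_main : ∀ (mat : List (List Int)) (r : Int) (resu : List (List (List Int))),
    Pre_rotar mat r resu → rotar mat r resu = rotar_alt mat r resu := by
  intro mat r resu hpre
  obtain ⟨hr, hcase⟩ := hpre
  unfold rotar rotar_alt
  simp only [PySem.List.len_eq]
  rcases hcase with rfl | ⟨hne, hrow⟩
  · rw [PySem.List.pyRange_one_eq_nil (le_refl 0)]
    simp [rotarFuel]
  · have hlen : (PySem.List.pyRange 0 r 1).length = r.toNat := by
      rw [PySem.List.length_pyRange_one]; omega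
    rw [← hlen]
    exact pv_loop_eq (↑mat.length) (PySem.List.pyRange 0 r 1) mat resu hne hrow rfl

-- ===== VERDICT (by name: the statement is the Claim_ definition above) =====
theorem rotar_spec : Claim_equal_rotar := by
  intro mat r resu _ hpre
  exact pv_main mat r resu hpre
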